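-- pv_equiv track=rewrite | github.com/yool-seoul/programmers_resolved | 70129.py | solution
-- ===== SOURCE A (Python) =====
-- def solution(s):
--     L1 = L2 = 0
--     while s != '1':
--         L = s.count('1')
--         L1 += 1
--         L2 += len(s) - L
--         s = bin(L)[2:]
--
--     return [L1, L2]
-- ===== SOURCE B (Python) =====
-- def solution(s):
--     if s == '1':
--         return [0, 0]
--     ones = s.count('1')
--     # bottom-up DP: steps[k]/zeros[k] = transforms / zeros removed to reduce bin(k) to '1'
--     steps = [0] * (ones + 1)
--     zeros = [0] * (ones + 1)
--     for k in range(2, ones + 1):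
--         p = k.bit_count()
--         steps[k] = steps[p] + 1
--         zeros[k] = zeros[p] + k.bit_length() - p
--     return [steps[ones] + 1, zeros[ones] + len(s) - ones]
-- ===== Notes on version B (the rewrite author's own statement) =====
-- stated objective: alternative
-- what changed: B replaces A's chain-following loop that rebuilds a bin(L)[2:] string each pass with a bottom-up dynamic-programming pass filling steps/zeros tables indexed by popcount value, then reads the answer for the initial count of ones.
import Mathlib
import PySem

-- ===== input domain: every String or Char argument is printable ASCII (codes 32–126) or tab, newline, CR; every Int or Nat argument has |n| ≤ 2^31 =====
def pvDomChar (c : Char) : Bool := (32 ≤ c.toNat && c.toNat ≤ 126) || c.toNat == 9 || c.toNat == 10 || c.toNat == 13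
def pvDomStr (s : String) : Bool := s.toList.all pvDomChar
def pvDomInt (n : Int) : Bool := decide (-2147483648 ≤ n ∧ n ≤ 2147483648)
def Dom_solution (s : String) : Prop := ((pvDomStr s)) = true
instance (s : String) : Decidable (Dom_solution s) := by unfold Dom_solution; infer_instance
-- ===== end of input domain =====

-- B replaces A's chain-following loop (rebuild bin(L)[2:] strings until '1') by a
-- bottom-up dynamic-programming table indexed by the popcount value (alternative).

-- ===== PORT A =====
-- A's while-loop, ported with fuel (the loop diverges when s has no '1'; Pre_ excludes that).
def solutionLoopA : Nat → List Char → Int → Int → List Int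
  | 0, _, L1, L2 => [L1, L2]
  | f + 1, cs, L1, L2 =>
    if cs = ['1'] then [L1, L2]
    else
      let L := PySem.Chars.count cs ['1']
      solutionLoopA f (PySem.Int.toBinChars (L : Int)) (L1 + 1) (L2 + ((cs.length : Int) - (L : Int)))

def solution (s : String) : List Int := solutionLoopA (s.toList.length + 2) s.toList 0 0

-- ===== PORT B =====
-- the body of B's `for k in range(2, ones+1)` loop on the pair of tables (steps, zeros)
def stepB (st : List Int × List Int) (k : Int) : List Int × List Int :=
  let p := PySem.Int.bitCount k
  (PySem.List.pySetD st.1 k (PySem.List.pyGetD st.1 (p : Int) 0 + 1),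
   PySem.List.pySetD st.2 k (PySem.List.pyGetD st.2 (p : Int) 0 +
     ((PySem.Int.bitLength k : Int) - (p : Int))))

-- [0] * (ones + 1), twice
def initB (ones : Nat) : List Int × List Int :=
  (PySem.List.pyRepeat [(0 : Int)] ((ones : Int) + 1),
   PySem.List.pyRepeat [(0 : Int)] ((ones : Int) + 1))

def solution_alt (s : String) : List Int :=
  if s = "1" then [0, 0]
  else
    let ones := PySem.Chars.count s.toList ['1']
    let st := (PySem.List.pyRange 2 ((ones : Int) + 1) 1).foldl stepB (initB ones)
    [PySem.List.pyGetD st.1 (ones : Int) 0 + 1,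
     PySem.List.pyGetD st.2 (ones : Int) 0 + ((s.toList.length : Int) - (ones : Int))]

-- ===== PRECONDITION & SPEC =====
-- Pre_ excludes exactly the strings with no '1' character, on which A's while-loop never terminates.
def Pre_solution (s : String) : Prop := '1' ∈ s.toList
instance (s : String) : Decidable (Pre_solution s) := by unfold Pre_solution; infer_instance
def pvWitness_solution : String := "110"

def Spec_solution (s : String) (out : List Int) : Prop := out = solution_alt s
instance (s : String) (out : List Int) : Decidable (Spec_solution s out) := by unfold Spec_solution; infer_instance

-- ===== CLAIM =====
def Claim_equal_solution : Prop := ∀ (s : String), Dom_solution s → Pre_solution s → Spec_solution s (solution s)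

-- ===== LEMMAS AND PROOFS =====

-- Chars.count with a single-character needle is List.count.
theorem countgo_one (fuel : Nat) : ∀ (cs : List Char) (acc : Nat), cs.length ≤ fuel →
    PySem.Chars.count.go ['1'] fuel cs acc = acc + cs.count '1' := by
  induction fuel with
  | zero => intro cs acc h; cases cs with
    | nil => simp [PySem.Chars.count.go]
    | cons c t => simp at h
  | succ f ih =>
    intro cs acc h
    cases cs with
    | nil => simp [PySem.Chars.count.go]
    | cons c t =>
      simp only [PySem.Chars.count.go]
      by_cases hc : c = '1'
      · subst hc
        rw [if_pos (by simp [List.isPrefixOf])]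
        simp only [List.length_singleton, List.drop_succ_cons, List.drop_zero]
        rw [ih t (acc + 1) (by simpa using h)]
        simp
        omega
      · rw [if_neg (by simp [List.isPrefixOf]; exact fun h' => hc h'.symm)]
        rw [ih t acc (by simpa using h)]
        simp [hc]

theorem chars_count_one (cs : List Char) : PySem.Chars.count cs ['1'] = cs.count '1' := by
  simp only [PySem.Chars.count, List.isEmpty_cons, if_false, Bool.false_eq_true]
  rw [countgo_one cs.length cs 0 le_rfl]
  omega

-- the binary digits of n (no leading zeros; ['0'] for 0), an easy-to-reason shape
def binChars (n : Nat) : List Char :=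
  if h : n < 2 then [Nat.digitChar (n % 2)]
  else binChars (n / 2) ++ [Nat.digitChar (n % 2)]
decreasing_by exact Nat.div_lt_self (by omega) (by norm_num)

theorem binChars_zero : binChars 0 = ['0'] := by rw [binChars]; simp [Nat.digitChar]

theorem binChars_one : binChars 1 = ['1'] := by rw [binChars]; simp [Nat.digitChar]

theorem toDigitsCore_eq_binChars (fuel : Nat) : ∀ (n : Nat) (ds : List Char), n < fuel →
    Nat.toDigitsCore 2 fuel n ds = binChars n ++ ds := by
  induction fuel with
  | zero => intro n ds h; omega
  | succ f ih =>
    intro n ds h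
    by_cases h2 : n < 2
    · have hn2 : n / 2 = 0 := by omega
      simp [Nat.toDigitsCore, hn2]
      rw [binChars, dif_pos h2]
      simp
    · have hn2 : ¬ (n / 2 = 0) := by omega
      simp only [Nat.toDigitsCore, hn2, if_false]
      rw [ih (n / 2) _ (by omega)]
      conv_rhs => rw [binChars]
      rw [dif_neg h2]
      simp

theorem toBinChars_natCast (n : Nat) : PySem.Int.toBinChars (n : Int) = binChars n := by
  simp only [PySem.Int.toBinChars]
  rw [if_neg (by omega)]
  simp only [Int.toNat_natCast, Nat.toDigits]
  rw [toDigitsCore_eq_binChars (n + 1) n [] (by omega)]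
  simp

theorem binChars_count (n : Nat) : (binChars n).count '1' = PySem.Int.bitCount (n : Int) := by
  induction n using Nat.strong_induction_on with
  | _ n ih =>
    by_cases h2 : n < 2
    · interval_cases n
      · rw [binChars_zero]; decide
      · rw [binChars_one]; decide
    · rw [binChars, dif_neg h2]
      rw [PySem.Int.bitCount_natCast (by omega : 0 < n)]
      rw [List.count_append, ih (n / 2) (by omega)]
      rcases Nat.mod_two_eq_zero_or_one n with h | h <;> simp [h, Nat.digitChar] <;> omega

theorem binChars_length (n : Nat) (hn : 1 ≤ n) :
    (binChars n).length = PySem.Int.bitLength (n : Int) := by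
  induction n using Nat.strong_induction_on with
  | _ n ih =>
    by_cases h2 : n < 2
    · have h1 : n = 1 := by omega
      subst h1
      rw [binChars_one]; decide
    · rw [binChars, dif_neg h2]
      rw [PySem.Int.bitLength_natCast (by omega : 0 < n)]
      rw [List.length_append, ih (n / 2) (by omega) (by omega)]
      simp

theorem binChars_ne_nil (n : Nat) : binChars n ≠ [] := by
  rw [binChars]; split <;> simp

theorem binChars_eq_one_iff (n : Nat) : binChars n = ['1'] ↔ n = 1 := by
  constructor
  · intro h
    by_cases h2 : n < 2
    · interval_cases n
      · rw [binChars_zero] at h; simp at h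
      · rfl
    · exfalso
      rw [binChars, dif_neg h2] at h
      have := congrArg List.length h
      rw [List.length_append] at this
      cases hl : binChars (n / 2) with
      | nil => exact binChars_ne_nil _ hl
      | cons a t => rw [hl] at this; simp at this
  · intro h; subst h; exact binChars_one

theorem one_le_bitCount (n : Nat) (hn : 1 ≤ n) : 1 ≤ PySem.Int.bitCount (n : Int) := by
  induction n using Nat.strong_induction_on with
  | _ n ih =>
    rw [PySem.Int.bitCount_natCast (by omega : 0 < n)]
    by_cases h2 : n < 2
    · have h1 : n = 1 := by omega
      subst h1; simp
    · have := ih (n / 2) (by omega) (by omega)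
      omega

theorem bitCount_le (n : Nat) : PySem.Int.bitCount (n : Int) ≤ n := by
  induction n using Nat.strong_induction_on with
  | _ n ih =>
    by_cases h0 : n = 0
    · subst h0; simp
    · rw [PySem.Int.bitCount_natCast (by omega : 0 < n)]
      have := ih (n / 2) (by omega)
      omega

theorem bitCount_lt (n : Nat) (hn : 2 ≤ n) : PySem.Int.bitCount (n : Int) < n := by
  rw [PySem.Int.bitCount_natCast (by omega : 0 < n)]
  have := bitCount_le (n / 2)
  omega

-- the mathematical values both programs compute: number of transforms / zeros removed
-- to reduce the binary representation of n to '1'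
def specSteps (n : Nat) : Int :=
  if _h : n < 2 then 0
  else specSteps (PySem.Int.bitCount (n : Int)) + 1
decreasing_by exact bitCount_lt n (by omega)

def specZeros (n : Nat) : Int :=
  if _h : n < 2 then 0
  else specZeros (PySem.Int.bitCount (n : Int)) +
    ((PySem.Int.bitLength (n : Int) : Int) - (PySem.Int.bitCount (n : Int) : Int))
decreasing_by exact bitCount_lt n (by omega)

-- A's loop computes the spec values
theorem loopA_spec (n : Nat) (hn : 1 ≤ n) : ∀ (fa : Nat), n ≤ fa → ∀ (l1 l2 : Int),
    solutionLoopA fa (PySem.Int.toBinChars (n : Int)) l1 l2 =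
      [l1 + specSteps n, l2 + specZeros n] := by
  induction n using Nat.strong_induction_on with
  | _ n ih =>
    intro fa hfa l1 l2
    obtain ⟨fa', rfl⟩ : ∃ k, fa = k + 1 := ⟨fa - 1, by omega⟩
    rw [toBinChars_natCast]
    by_cases h1 : n = 1
    · subst h1
      rw [specSteps, specZeros]
      simp [solutionLoopA, binChars_one]
    · have hn2 : 2 ≤ n := by omega
      simp only [solutionLoopA,
        if_neg ((not_congr (binChars_eq_one_iff n)).mpr h1)]
      rw [chars_count_one, binChars_count]
      rw [binChars_length n (by omega)]
      have h1le := one_le_bitCount n (by omega)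
      have hlt := bitCount_lt n hn2
      rw [ih (PySem.Int.bitCount (n : Int)) hlt h1le fa' (by omega)]
      conv_rhs => rw [specSteps, specZeros]
      rw [dif_neg (by omega : ¬ n < 2), dif_neg (by omega : ¬ n < 2)]
      simp only [List.cons.injEq, and_true]
      constructor <;> ring

-- B's DP tables hold the spec values for every index up to the last processed k
theorem dpInv (ones : Nat) : ∀ (m : Nat), 1 ≤ m → m ≤ ones →
    (((PySem.List.pyRange 2 ((m : Int) + 1) 1).foldl stepB (initB ones)).1.length = ones + 1 ∧
     ((PySem.List.pyRange 2 ((m : Int) + 1) 1).foldl stepB (initB ones)).2.length = ones + 1) ∧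
    ∀ (k : Nat), k ≤ m →
      ((PySem.List.pyRange 2 ((m : Int) + 1) 1).foldl stepB (initB ones)).1.getD k 0 = specSteps k ∧
      ((PySem.List.pyRange 2 ((m : Int) + 1) 1).foldl stepB (initB ones)).2.getD k 0 = specZeros k := by
  intro m hm
  induction m, hm using Nat.le_induction with
  | base =>
    intro hones
    have h0 : 0 < ones := hones
    rw [PySem.List.pyRange_one_eq_nil (by norm_num)]
    simp only [List.foldl_nil, initB, PySem.List.pyRepeat_singleton]
    refine ⟨⟨by simp, by simp⟩, ?_⟩
    intro k hk
    interval_cases k <;>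
      simp [List.getD, h0, specSteps, specZeros]
  | succ m hm ih =>
    intro hle
    have ihm := ih (by omega)
    obtain ⟨⟨hl1, hl2⟩, hget⟩ := ihm
    have hsplit : PySem.List.pyRange 2 (((m + 1 : Nat) : Int) + 1) 1 =
        PySem.List.pyRange 2 ((m : Int) + 1) 1 ++ [((m : Int) + 1)] := by
      push_cast
      exact PySem.List.pyRange_one_succ_right (by omega)
    rw [hsplit, List.foldl_append]
    set st := (PySem.List.pyRange 2 ((m : Int) + 1) 1).foldl stepB (initB ones) with hst
    have hp1 : 1 ≤ PySem.Int.bitCount ((m + 1 : Nat) : Int) := one_le_bitCount (m + 1) (by omega)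
    have hplt : PySem.Int.bitCount ((m + 1 : Nat) : Int) < m + 1 := bitCount_lt (m + 1) (by omega)
    have hcast : ((m : Int) + 1) = ((m + 1 : Nat) : Int) := by push_cast; ring
    simp only [List.foldl_cons, List.foldl_nil, stepB, hcast, PySem.List.pySetD_natCast,
      PySem.List.pyGetD_natCast]
    refine ⟨⟨by simp [hl1], by simp [hl2]⟩, ?_⟩
    intro k hk
    by_cases hkm : k = m + 1
    · subst hkm
      have h1 : m + 1 < st.1.length := by omega
      have h2 : m + 1 < st.2.length := by omega
      obtain ⟨hs, hz⟩ := hget (PySem.Int.bitCount ((m + 1 : Nat) : Int)) (by omega)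
      constructor
      · rw [List.getD, List.getElem?_set, if_pos rfl, if_pos h1, Option.getD_some, hs]
        conv_rhs => rw [specSteps]
        rw [dif_neg (by omega : ¬ m + 1 < 2)]
      · rw [List.getD, List.getElem?_set, if_pos rfl, if_pos h2, Option.getD_some, hz]
        conv_rhs => rw [specZeros]
        rw [dif_neg (by omega : ¬ m + 1 < 2)]
    · have hk' : k ≤ m := by omega
      obtain ⟨hs, hz⟩ := hget k hk'
      constructor
      · rw [List.getD, List.getElem?_set, if_neg (by omega)]
        simpa [List.getD] using hs
      · rw [List.getD, List.getElem?_set, if_neg (by omega)]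
        simpa [List.getD] using hz

-- ===== VERDICT (by name: the statement is the Claim_ definition above) =====
theorem solution_spec : Claim_equal_solution := by
  intro s _ hpre
  unfold Spec_solution solution solution_alt
  by_cases h1 : s = "1"
  · subst h1
    decide
  · have hlist : s.toList ≠ ['1'] := by
      intro h
      apply h1
      have : s.toList = ("1" : String).toList := by simpa using h
      exact String.toList_inj.mp this
    rw [if_neg h1]
    have hones : 1 ≤ PySem.Chars.count s.toList ['1'] := by
      rw [chars_count_one]
      exact List.one_le_count_iff.mpr hpre
    have hle : PySem.Chars.count s.toList ['1'] ≤ s.toList.length := by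
      rw [chars_count_one]; exact List.count_le_length
    set ones := PySem.Chars.count s.toList ['1'] with honesdef
    show solutionLoopA (s.toList.length + 1 + 1) s.toList 0 0 = _
    rw [solutionLoopA, if_neg hlist]
    rw [← honesdef]
    rw [loopA_spec ones hones (s.toList.length + 1) (by omega)]
    obtain ⟨⟨hl1, hl2⟩, hget⟩ := dpInv ones ones hones le_rfl
    obtain ⟨hs, hz⟩ := hget ones le_rfl
    simp only [PySem.List.pyGetD_natCast]
    rw [hs, hz]
    simp only [List.cons.injEq, and_true]
    constructor <;> ring
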